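-- pv_equiv track=rewrite | github.com/taylorott/Advent_of_Code | src/Year_2019/Day24/Solution.py | eval_score
-- ===== SOURCE A (Python) =====
-- def eval_score(grid_in):
--     total = 0
--     a = 1
--     for line in grid_in:
--         for item in line:
--             if item=='#':
--                 total+=a
--             a*=2
--     return total
-- ===== SOURCE B (Python) =====
-- def eval_score(grid_in):
--     total = 0
--     for line in reversed(grid_in):
--         row = 0
--         for item in reversed(line):
--             row = row * 2 + (1 if item == '#' else 0)
--         total = (total << len(line)) + row
--     return total
-- ===== Notes on version B (the rewrite author's own statement) =====
-- stated objective: faster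
-- what changed: B traverses the grid back-to-front, Horner-encoding each row into a small integer and splicing rows together with one shift per row, instead of A's forward pass that doubles and adds a full-width big-int accumulator at every cell.
import Mathlib
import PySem

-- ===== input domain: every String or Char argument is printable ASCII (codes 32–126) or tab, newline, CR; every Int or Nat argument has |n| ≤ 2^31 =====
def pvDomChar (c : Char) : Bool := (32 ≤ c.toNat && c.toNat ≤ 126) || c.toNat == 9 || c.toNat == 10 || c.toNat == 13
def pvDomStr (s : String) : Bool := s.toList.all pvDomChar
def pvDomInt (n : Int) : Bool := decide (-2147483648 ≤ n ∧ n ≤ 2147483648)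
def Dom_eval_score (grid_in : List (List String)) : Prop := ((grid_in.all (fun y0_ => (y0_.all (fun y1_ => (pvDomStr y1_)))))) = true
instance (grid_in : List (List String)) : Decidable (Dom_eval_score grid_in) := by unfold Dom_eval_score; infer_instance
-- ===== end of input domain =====

-- B traverses rows and cells back-to-front, Horner-encoding each row and splicing rows
-- with a shift by the row length, instead of A's forward running power-of-two accumulator
-- (objective: faster; per-row shifts replace per-cell big-int updates).

-- ===== PORT A =====
def eval_score (grid_in : List (List String)) : Int :=
  (grid_in.foldl
    (fun st line =>
      line.foldl
        (fun st item =>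
          ((if item == "#" then st.1 + st.2 else st.1), st.2 * 2))
        st)
    ((0 : Int), (1 : Int))).1

-- ===== PORT B =====
-- Python's 'total << len(line)' is ported as total * 2 ^ line.length (exact for all ints).
def eval_score_alt (grid_in : List (List String)) : Int :=
  grid_in.reverse.foldl
    (fun total line =>
      let row : Int :=
        line.reverse.foldl (fun r item => r * 2 + (if item == "#" then 1 else 0)) 0
      total * 2 ^ line.length + row)
    0

-- ===== PRECONDITION & SPEC =====
def Spec_eval_score (grid_in : List (List String)) (out : Int) : Prop := out = eval_score_alt grid_in
instance (grid_in : List (List String)) (out : Int) : Decidable (Spec_eval_score grid_in out) := by unfold Spec_eval_score; infer_instance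

-- ===== CLAIM (what is proved, stated in full; the proofs are below) =====
def Claim_equal_eval_score : Prop := ∀ (grid_in : List (List String)), Dom_eval_score grid_in → Spec_eval_score grid_in (eval_score grid_in)

-- ===== LEMMAS AND PROOFS =====

/-- Reference value: LSB-first bitmask of a flat cell list. -/
def pvBits (l : List String) : Int :=
  match l with
  | [] => 0
  | x :: xs => (if x == "#" then 1 else 0) + 2 * pvBits xs

theorem pvBits_append (l m : List String) :
    pvBits (l ++ m) = pvBits l + 2 ^ l.length * pvBits m := by
  induction l with
  | nil => simp [pvBits]
  | cons x xs ih => simp only [List.cons_append, pvBits, ih, List.length_cons]; ring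

theorem pvA_flat (l : List String) (t a : Int) :
    l.foldl (fun st item => ((if item == "#" then st.1 + st.2 else st.1), st.2 * 2)) (t, a)
      = (t + a * pvBits l, a * 2 ^ l.length) := by
  induction l generalizing t a with
  | nil => simp [pvBits]
  | cons x xs ih =>
    simp only [List.foldl_cons, ih, pvBits, List.length_cons, Prod.mk.injEq]
    refine ⟨?_, by ring⟩
    split <;> ring

theorem pvA_nested (grid_in : List (List String)) (st : Int × Int) :
    grid_in.foldl
        (fun st line =>
          line.foldl (fun st item => ((if item == "#" then st.1 + st.2 else st.1), st.2 * 2)) st)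
        st
      = (grid_in.flatMap (fun line => line)).foldl
          (fun st item => ((if item == "#" then st.1 + st.2 else st.1), st.2 * 2)) st := by
  induction grid_in generalizing st with
  | nil => simp
  | cons l ls ih =>
    simp only [List.foldl_cons, List.flatMap_cons, List.foldl_append]
    exact ih _

theorem pvB_row (l : List String) (r : Int) :
    l.reverse.foldl (fun r item => r * 2 + (if item == "#" then 1 else 0)) r
      = r * 2 ^ l.length + pvBits l := by
  induction l generalizing r with
  | nil => simp [pvBits]
  | cons x xs ih =>
    simp only [List.reverse_cons, List.foldl_append, List.foldl_cons, List.foldl_nil, ih,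
      pvBits, List.length_cons]
    ring

theorem pvB_outer (grid_in : List (List String)) (t : Int) :
    grid_in.reverse.foldl
        (fun total line =>
          let row : Int :=
            line.reverse.foldl (fun r item => r * 2 + (if item == "#" then 1 else 0)) 0
          total * 2 ^ line.length + row)
        t
      = t * 2 ^ (grid_in.flatMap (fun line => line)).length
          + pvBits (grid_in.flatMap (fun line => line)) := by
  induction grid_in generalizing t with
  | nil => simp [pvBits]
  | cons l ls ih =>
    rw [List.reverse_cons, List.foldl_append, ih]
    simp only [List.foldl_cons, List.foldl_nil, pvB_row, List.flatMap_cons, pvBits_append,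
      List.length_append]
    ring

-- ===== VERDICT (by name: the statement is the Claim_ definition above) =====
theorem eval_score_spec : Claim_equal_eval_score := by
  intro grid_in _
  unfold Spec_eval_score eval_score eval_score_alt
  rw [pvA_nested, pvA_flat, pvB_outer]
  simp
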